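-- pv_equiv track=rewrite | github.com/kaihuang1122/Arknights-Collectibles-Identifier | match.py | find_missing_slots
-- ===== SOURCE A (Python) =====
-- def find_missing_slots(answers, layout):
--     present = {}
--     for obj in answers:
--         present.setdefault(obj["row"], set()).add(obj["col"])
--     missing = []
--     for row_idx, count in layout.items():
--         for col_idx in range(count):
--             if col_idx not in present.get(row_idx, set()):
--                 missing.append((row_idx, col_idx))
--     return missing
-- ===== SOURCE B (Python) =====
-- def find_missing_slots(answers, layout):
--     present = {}
--     for obj in answers:
--         present.setdefault(obj["row"], []).append(obj["col"])
--     missing = []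
--     for row_idx, count in layout.items():
--         cols = sorted({c for c in present.get(row_idx, []) if 0 <= c < count})
--         prev = -1
--         for c in cols:
--             missing.extend((row_idx, x) for x in range(prev + 1, c))
--             prev = c
--         missing.extend((row_idx, x) for x in range(prev + 1, count))
--     return missing
-- ===== Notes on version B (the rewrite author's own statement) =====
-- stated objective: alternative
-- what changed: B replaces A's per-column membership probes (testing every index in range(count) against a set) by a gap-walk: per row it sorts the distinct in-range present columns and emits the ranges of absent indices between consecutive present ones, so no membership test occurs at all.
import Mathlib
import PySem

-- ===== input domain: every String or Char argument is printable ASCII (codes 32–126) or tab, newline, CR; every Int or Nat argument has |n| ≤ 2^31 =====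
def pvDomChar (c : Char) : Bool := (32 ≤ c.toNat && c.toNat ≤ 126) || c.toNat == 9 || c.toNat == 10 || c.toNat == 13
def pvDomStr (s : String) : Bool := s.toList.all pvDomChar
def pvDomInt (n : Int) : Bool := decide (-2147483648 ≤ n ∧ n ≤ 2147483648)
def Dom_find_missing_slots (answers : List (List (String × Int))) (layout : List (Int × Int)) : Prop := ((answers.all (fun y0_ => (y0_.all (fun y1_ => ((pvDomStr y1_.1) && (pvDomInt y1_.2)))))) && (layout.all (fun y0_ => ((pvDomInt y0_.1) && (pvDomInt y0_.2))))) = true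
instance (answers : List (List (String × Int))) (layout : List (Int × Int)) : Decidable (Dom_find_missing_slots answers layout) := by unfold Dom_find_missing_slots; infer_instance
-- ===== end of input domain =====

-- B replaces A's per-column membership probes by a per-row gap-walk over the sorted distinct
-- in-range present columns; same results, a different inner algorithm (objective: alternative).

-- ===== PORT A =====
-- obj["row"] / obj["col"]: first-match dict lookup; total via getD, exact under Pre_ (keys present)
def pvRowOf (obj : List (String × Int)) : Int := (PySem.Dict.mk obj).getD "row" 0
def pvColOf (obj : List (String × Int)) : Int := (PySem.Dict.mk obj).getD "col" 0

def find_missing_slots (answers : List (List (String × Int))) (layout : List (Int × Int)) : List (Int × Int) :=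
  let present : PySem.Dict Int (PySem.Set Int) :=
    answers.foldl (fun d obj =>
      d.modify (pvRowOf obj) PySem.Set.empty (fun s => PySem.Set.add s (pvColOf obj)))
      PySem.Dict.empty
  layout.foldl (fun missing rc =>
    (PySem.List.pyRange 0 rc.2 1).foldl (fun m col_idx =>
      if (present.getD rc.1 PySem.Set.empty).contains col_idx then m
      else m ++ [(rc.1, col_idx)]) missing) []

-- ===== PORT B =====
def find_missing_slots_alt (answers : List (List (String × Int))) (layout : List (Int × Int)) : List (Int × Int) :=
  let present : PySem.Dict Int (List Int) :=
    answers.foldl (fun d obj =>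
      d.modify (pvRowOf obj) [] (fun l => l ++ [pvColOf obj]))
      PySem.Dict.empty
  layout.foldl (fun missing rc =>
    let cols : List Int :=
      PySem.List.sorted
        (PySem.Set.ofList ((present.getD rc.1 []).filter (fun c => decide (0 ≤ c ∧ c < rc.2))))
        (fun x => x) false
    let st := cols.foldl (fun (mp : List (Int × Int) × Int) c =>
        (mp.1 ++ (PySem.List.pyRange (mp.2 + 1) c 1).map (fun x => (rc.1, x)), c)) (missing, -1)
    st.1 ++ (PySem.List.pyRange (st.2 + 1) rc.2 1).map (fun x => (rc.1, x))) []

-- ===== PRECONDITION & SPEC =====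
-- Pre_ excludes answers containing a dict without a "row" or "col" key, on which Python A raises KeyError.
def Pre_find_missing_slots (answers : List (List (String × Int))) (layout : List (Int × Int)) : Prop :=
  ∀ obj ∈ answers, "row" ∈ obj.map (·.1) ∧ "col" ∈ obj.map (·.1)
instance (answers : List (List (String × Int))) (layout : List (Int × Int)) : Decidable (Pre_find_missing_slots answers layout) := by unfold Pre_find_missing_slots; infer_instance

def pvWitness_find_missing_slots : (List (List (String × Int))) × (List (Int × Int)) :=
  ([[("row", 0), ("col", 1)]], [(0, 2)])

def Spec_find_missing_slots (answers : List (List (String × Int))) (layout : List (Int × Int)) (out : List (Int × Int)) : Prop := out = find_missing_slots_alt answers layout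
instance (answers : List (List (String × Int))) (layout : List (Int × Int)) (out : List (Int × Int)) : Decidable (Spec_find_missing_slots answers layout out) := by unfold Spec_find_missing_slots; infer_instance

-- ===== CLAIM (what is proved, stated in full; the proofs are below) =====
def Claim_equal_find_missing_slots : Prop := ∀ (answers : List (List (String × Int))) (layout : List (Int × Int)), Dom_find_missing_slots answers layout → Pre_find_missing_slots answers layout → Spec_find_missing_slots answers layout (find_missing_slots answers layout)

-- ===== LEMMAS AND PROOFS =====

-- membership in A's dict-of-sets equals membership of the pair in the key list
theorem pv_build_mem_A (answers : List (List (String × Int)))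
    (d : PySem.Dict Int (PySem.Set Int)) (row col : Int) :
    col ∈ (answers.foldl (fun d obj =>
        d.modify (pvRowOf obj) PySem.Set.empty (fun s => PySem.Set.add s (pvColOf obj)))
        d).getD row PySem.Set.empty
      ↔ col ∈ d.getD row PySem.Set.empty ∨
        (row, col) ∈ answers.map (fun obj => (pvRowOf obj, pvColOf obj)) := by
  induction answers generalizing d with
  | nil => simp
  | cons obj rest ih =>
    simp only [List.foldl_cons, List.map_cons, List.mem_cons, ih]
    by_cases h : row = pvRowOf obj
    · subst h
      rw [PySem.Dict.getD_modify_self]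
      simp [PySem.Set.mem_add, Prod.ext_iff, or_assoc, or_comm, or_left_comm]
    · rw [PySem.Dict.getD_modify_of_ne _ _ _ h]
      constructor
      · rintro (hm | hm)
        · exact Or.inl hm
        · exact Or.inr (Or.inr hm)
      · rintro (hm | hp | hm)
        · exact Or.inl hm
        · exact absurd (congrArg Prod.fst hp) h
        · exact Or.inr hm

-- membership in B's dict-of-lists equals membership of the pair in the key list
theorem pv_build_mem_B (answers : List (List (String × Int)))
    (d : PySem.Dict Int (List Int)) (row col : Int) :
    col ∈ (answers.foldl (fun d obj =>
        d.modify (pvRowOf obj) [] (fun l => l ++ [pvColOf obj]))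
        d).getD row []
      ↔ col ∈ d.getD row [] ∨
        (row, col) ∈ answers.map (fun obj => (pvRowOf obj, pvColOf obj)) := by
  induction answers generalizing d with
  | nil => simp
  | cons obj rest ih =>
    simp only [List.foldl_cons, List.map_cons, List.mem_cons, ih]
    by_cases h : row = pvRowOf obj
    · subst h
      rw [PySem.Dict.getD_modify_self]
      simp [Prod.ext_iff, or_assoc, or_comm, or_left_comm]
    · rw [PySem.Dict.getD_modify_of_ne _ _ _ h]
      constructor
      · rintro (hm | hm)
        · exact Or.inl hm
        · exact Or.inr (Or.inr hm)
      · rintro (hm | hp | hm)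
        · exact Or.inl hm
        · exact absurd (congrArg Prod.fst hp) h
        · exact Or.inr hm

-- the gap-walk over a strictly increasing list of columns in (prev, count) emits exactly the
-- absent indices of [prev+1, count), in order
theorem pv_gap_walk (row count : Int) (cols : List Int) (prev : Int) (m : List (Int × Int))
    (hs : cols.Pairwise (· < ·)) (hb : ∀ c ∈ cols, prev < c ∧ c < count) :
    (let st := cols.foldl (fun (mp : List (Int × Int) × Int) c =>
        (mp.1 ++ (PySem.List.pyRange (mp.2 + 1) c 1).map (fun x => (row, x)), c)) (m, prev)
     st.1 ++ (PySem.List.pyRange (st.2 + 1) count 1).map (fun x => (row, x)))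
    = m ++ ((PySem.List.pyRange (prev + 1) count 1).filter
        (fun x => !cols.contains x)).map (fun x => (row, x)) := by
  induction cols generalizing prev m with
  | nil =>
    simp
  | cons c rest ih =>
    obtain ⟨hc1, hc2⟩ := hb c (List.mem_cons_self ..)
    have hrest_gt : ∀ b ∈ rest, c < b := (List.pairwise_cons.mp hs).1
    have hb' : ∀ b ∈ rest, c < b ∧ b < count :=
      fun b hbm => ⟨hrest_gt b hbm, (hb b (List.mem_cons_of_mem _ hbm)).2⟩
    simp only [List.foldl_cons]
    rw [ih c (m ++ (PySem.List.pyRange (prev + 1) c 1).map (fun x => (row, x)))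
        (List.pairwise_cons.mp hs).2 hb']
    rw [PySem.List.pyRange_one_append (prev + 1) c count (by omega) (by omega),
        PySem.List.pyRange_one_cons hc2]
    rw [List.filter_append, List.filter_cons]
    have hcmem : (c :: rest).contains c = true := by simp
    simp only [hcmem, Bool.not_true, if_neg (by simp : ¬ (false = true))]
    have h1 : (PySem.List.pyRange (prev + 1) c 1).filter (fun x => !(c :: rest).contains x)
        = PySem.List.pyRange (prev + 1) c 1 := by
      apply List.filter_eq_self.mpr
      intro x hx
      have hxc : x < c := (PySem.List.mem_pyRange_one.mp hx).2
      simp only [List.contains_cons, Bool.not_eq_eq_eq_not, Bool.not_true, Bool.or_eq_false_iff]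
      constructor
      · simp [show x ≠ c from by omega]
      · simp only [List.contains_eq_mem, decide_eq_false_iff_not]
        intro hxm
        exact absurd (hrest_gt x hxm) (by omega)
    have h2 : (PySem.List.pyRange (c + 1) count 1).filter (fun x => !(c :: rest).contains x)
        = (PySem.List.pyRange (c + 1) count 1).filter (fun x => !rest.contains x) := by
      apply List.filter_congr
      intro x hx
      have hxc : c < x := (PySem.List.mem_pyRange_one.mp hx).1
      simp [show x ≠ c from by omega]
    rw [h1, h2]
    simp [List.map_append, List.append_assoc]

-- ===== VERDICT (by name: the statement is the Claim_ definition above) =====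
theorem find_missing_slots_spec : Claim_equal_find_missing_slots := by
  intro answers layout _ _
  show find_missing_slots answers layout = find_missing_slots_alt answers layout
  simp only [find_missing_slots, find_missing_slots_alt]
  -- both sides become a flatMap of the same per-row list of missing slots
  have hA : (fun (missing : List (Int × Int)) (rc : Int × Int) =>
      (PySem.List.pyRange 0 rc.2 1).foldl (fun m col_idx =>
        if ((answers.foldl (fun d obj =>
            d.modify (pvRowOf obj) PySem.Set.empty (fun s => PySem.Set.add s (pvColOf obj)))
            PySem.Dict.empty).getD rc.1 PySem.Set.empty).contains col_idx then m
        else m ++ [(rc.1, col_idx)]) missing)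
      = (fun missing rc => missing ++
          ((PySem.List.pyRange 0 rc.2 1).filter
            (fun c => decide ((rc.1, c) ∉ answers.map (fun obj => (pvRowOf obj, pvColOf obj))))).map
            (fun c => (rc.1, c))) := by
    funext missing rc
    have hite : ∀ (m : List (Int × Int)) (c : Int),
        (if ((answers.foldl (fun d obj =>
            d.modify (pvRowOf obj) PySem.Set.empty (fun s => PySem.Set.add s (pvColOf obj)))
            PySem.Dict.empty).getD rc.1 PySem.Set.empty).contains c then m
         else m ++ [(rc.1, c)])
        = (if (rc.1, c) ∉ answers.map (fun obj => (pvRowOf obj, pvColOf obj))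
           then m ++ [(rc.1, c)] else m) := by
      intro m c
      have hmem : ((answers.foldl (fun d obj =>
          d.modify (pvRowOf obj) PySem.Set.empty (fun s => PySem.Set.add s (pvColOf obj)))
          PySem.Dict.empty).getD rc.1 PySem.Set.empty).contains c = true
          ↔ (rc.1, c) ∈ answers.map (fun obj => (pvRowOf obj, pvColOf obj)) := by
        rw [PySem.Set.contains_iff, pv_build_mem_A]
        simp [PySem.Dict.empty, PySem.Dict.getD, PySem.Dict.get?]
      by_cases hin : (rc.1, c) ∈ answers.map (fun obj => (pvRowOf obj, pvColOf obj))
      · rw [if_pos (hmem.mpr hin), if_neg (by simpa using hin)]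
      · rw [if_neg (fun hc => hin (hmem.mp hc)), if_pos hin]
    simp only [hite]
    rw [PySem.List.foldl_append_ite _ (fun c => (rc.1, c))]
  have hB : (fun (missing : List (Int × Int)) (rc : Int × Int) =>
      let cols : List Int :=
        PySem.List.sorted
          (PySem.Set.ofList (((answers.foldl (fun d obj =>
              d.modify (pvRowOf obj) [] (fun l => l ++ [pvColOf obj]))
              PySem.Dict.empty).getD rc.1 []).filter (fun c => decide (0 ≤ c ∧ c < rc.2))))
          (fun x => x) false
      let st := cols.foldl (fun (mp : List (Int × Int) × Int) c =>
          (mp.1 ++ (PySem.List.pyRange (mp.2 + 1) c 1).map (fun x => (rc.1, x)), c)) (missing, -1)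
      st.1 ++ (PySem.List.pyRange (st.2 + 1) rc.2 1).map (fun x => (rc.1, x)))
      = (fun missing rc => missing ++
          ((PySem.List.pyRange 0 rc.2 1).filter
            (fun c => decide ((rc.1, c) ∉ answers.map (fun obj => (pvRowOf obj, pvColOf obj))))).map
            (fun c => (rc.1, c))) := by
    funext missing rc
    set cols : List Int :=
      PySem.List.sorted
        (PySem.Set.ofList (((answers.foldl (fun d obj =>
            d.modify (pvRowOf obj) [] (fun l => l ++ [pvColOf obj]))
            PySem.Dict.empty).getD rc.1 []).filter (fun c => decide (0 ≤ c ∧ c < rc.2))))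
        (fun x => x) false with hcols
    have hsorted : cols.Pairwise (· < ·) := by
      rw [hcols]; exact PySem.List.sorted_ofList_pairwise_lt _
    have hmemcols : ∀ x, x ∈ cols ↔
        ((rc.1, x) ∈ answers.map (fun obj => (pvRowOf obj, pvColOf obj)) ∧ 0 ≤ x ∧ x < rc.2) := by
      intro x
      rw [hcols, PySem.List.mem_sorted, PySem.Set.mem_ofList, List.mem_filter]
      rw [pv_build_mem_B]
      simp [PySem.Dict.empty, PySem.Dict.getD, PySem.Dict.get?, and_comm]
    have hbounds : ∀ c ∈ cols, (-1 : Int) < c ∧ c < rc.2 := by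
      intro c hc
      have := (hmemcols c).mp hc
      omega
    simp only []
    rw [pv_gap_walk rc.1 rc.2 cols (-1) missing hsorted hbounds]
    have : (-1 : Int) + 1 = 0 := by omega
    rw [this]
    congr 1
    congr 1
    apply List.filter_congr
    intro x hx
    have hxr := PySem.List.mem_pyRange_one.mp hx
    rw [Bool.eq_iff_iff]
    simp only [Bool.not_eq_eq_eq_not, Bool.not_true, List.contains_eq_mem, decide_eq_false_iff_not,
      decide_eq_true_eq, hmemcols x]
    constructor
    · intro h hmem; exact h ⟨hmem, by omega⟩
    · intro h hmem; exact h hmem.1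
  rw [hA, hB]
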